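-- pv_equiv track=rewrite | github.com/treeleaves30760/NNUE-mlx | src/search/evaluator.py | _chess_king_shelter
-- ===== SOURCE A (Python) =====
-- from typing import List, Optional
--
-- def _chess_king_shelter(king_sq: Optional[int],
--                          friendly_pawn_squares: List[int],
--                          side: int) -> int:
--     """Return shelter bonus for a castled-or-tucked-in king.
--
--     Counts up to three friendly pawns on the files (kf-1, kf, kf+1)
--     directly in front of the king. A pawn one rank ahead is worth 20,
--     two ranks ahead 10, further ahead or missing 0. Mid-board or
--     advanced kings get no shelter — only kings on their home two ranks
--     qualify, so an endgame king in the centre doesn't accidentally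
--     score positive shelter.
--     """
--     if king_sq is None or king_sq < 0:
--         return 0
--     kf = king_sq % 8
--     kr = king_sq // 8
--     if side == 0:
--         if kr > 2:
--             return 0
--         want_ranks = (kr + 1, kr + 2)
--     else:
--         if kr < 5:
--             return 0
--         want_ranks = (kr - 1, kr - 2)
--
--     shelter = 0
--     for pf in (kf - 1, kf, kf + 1):
--         if not (0 <= pf < 8):
--             continue
--         best_bonus = 0
--         for psq in friendly_pawn_squares:
--             if psq % 8 != pf:
--                 continue
--             pr = psq // 8
--             if pr == want_ranks[0]:
--                 best_bonus = max(best_bonus, 20)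
--             elif pr == want_ranks[1]:
--                 best_bonus = max(best_bonus, 10)
--         shelter += best_bonus
--     return shelter
-- ===== SOURCE B (Python) =====
-- from typing import List, Optional
--
-- def _chess_king_shelter(king_sq: Optional[int],
--                          friendly_pawn_squares: List[int],
--                          side: int) -> int:
--     """Shelter via set algebra: collect the files holding a pawn on each of
--     the two wanted ranks, then the bonus is 20 per near file with a rank-1
--     pawn plus 10 per near file with only a rank-2 pawn, read off as set
--     cardinalities -- no per-file loop, no per-file rescans."""
--     if king_sq is None or king_sq < 0:
--         return 0
--     kf = king_sq % 8
--     kr = king_sq // 8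
--     if side == 0:
--         if kr > 2:
--             return 0
--         w1, w2 = kr + 1, kr + 2
--     else:
--         if kr < 5:
--             return 0
--         w1, w2 = kr - 1, kr - 2
--     near = {f for f in (kf - 1, kf, kf + 1) if 0 <= f < 8}
--     f1 = {psq % 8 for psq in friendly_pawn_squares if psq // 8 == w1}
--     f2 = {psq % 8 for psq in friendly_pawn_squares if psq // 8 == w2}
--     return 20 * len(f1 & near) + 10 * len((f2 - f1) & near)
-- ===== Notes on version B (the rewrite author's own statement) =====
-- stated objective: alternative
-- what changed: B drops A's per-file loop with an inner pawn rescan and running max entirely: it builds the set of files holding a pawn on each of the two wanted ranks plus the set of valid near files, and reads the bonus off as set cardinalities 20*|f1&near| + 10*|(f2-f1)&near| (set difference encodes the 20-over-10 precedence).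
import Mathlib
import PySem

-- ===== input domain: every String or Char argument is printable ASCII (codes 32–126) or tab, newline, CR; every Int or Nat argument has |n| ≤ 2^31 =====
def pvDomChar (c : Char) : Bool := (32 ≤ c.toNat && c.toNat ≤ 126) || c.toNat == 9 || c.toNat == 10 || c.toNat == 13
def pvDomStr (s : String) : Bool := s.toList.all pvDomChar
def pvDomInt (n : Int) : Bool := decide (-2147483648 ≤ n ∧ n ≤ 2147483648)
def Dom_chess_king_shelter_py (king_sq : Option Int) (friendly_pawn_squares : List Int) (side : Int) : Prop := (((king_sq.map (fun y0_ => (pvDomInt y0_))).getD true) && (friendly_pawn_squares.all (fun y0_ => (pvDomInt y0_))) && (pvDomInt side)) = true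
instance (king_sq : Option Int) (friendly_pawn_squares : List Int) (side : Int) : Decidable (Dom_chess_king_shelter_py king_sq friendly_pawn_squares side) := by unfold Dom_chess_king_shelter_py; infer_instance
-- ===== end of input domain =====

-- B replaces A's three-file loop with inner pawn rescans by set algebra: sets of files holding a
-- pawn on each wanted rank, bonus read off as 20*|f1&near| + 10*|(f2-f1)&near| (objective: alternative).
-- ===== PORT A =====
def pvA_step (pf w1 w2 : Int) (b psq : Int) : Int :=
  if PySem.Int.mod psq 8 ≠ pf then b
  else
    let pr := PySem.Int.floordiv psq 8
    if pr = w1 then max b 20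
    else if pr = w2 then max b 10
    else b

def pvA_file_bonus (l : List Int) (pf w1 w2 : Int) : Int :=
  l.foldl (pvA_step pf w1 w2) 0

def pvA_shelter (l : List Int) (kf w1 w2 : Int) : Int :=
  [kf - 1, kf, kf + 1].foldl (fun s pf =>
    if 0 ≤ pf ∧ pf < 8 then s + pvA_file_bonus l pf w1 w2 else s) 0

def chess_king_shelter_py (king_sq : Option Int) (friendly_pawn_squares : List Int) (side : Int) : Int :=
  match king_sq with
  | none => 0
  | some ksq =>
    if ksq < 0 then 0
    else
      let kf := PySem.Int.mod ksq 8
      let kr := PySem.Int.floordiv ksq 8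
      if side = 0 then
        if kr > 2 then 0 else pvA_shelter friendly_pawn_squares kf (kr + 1) (kr + 2)
      else
        if kr < 5 then 0 else pvA_shelter friendly_pawn_squares kf (kr - 1) (kr - 2)

-- ===== PORT B =====
-- {psq % 8 for psq in l if psq // 8 == w}
def pvB_files_at (l : List Int) (w : Int) : PySem.Set Int :=
  PySem.Set.ofList ((l.filter (fun psq => PySem.Int.floordiv psq 8 == w)).map
    (fun psq => PySem.Int.mod psq 8))

def pvB_shelter (l : List Int) (kf w1 w2 : Int) : Int :=
  let near : PySem.Set Int :=
    PySem.Set.ofList (([kf - 1, kf, kf + 1]).filter (fun f => decide (0 ≤ f ∧ f < 8)))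
  let f1 := pvB_files_at l w1
  let f2 := pvB_files_at l w2
  20 * PySem.Set.len (PySem.Set.inter f1 near)
    + 10 * PySem.Set.len (PySem.Set.inter (PySem.Set.diff f2 f1) near)

def chess_king_shelter_py_alt (king_sq : Option Int) (friendly_pawn_squares : List Int) (side : Int) : Int :=
  match king_sq with
  | none => 0
  | some ksq =>
    if ksq < 0 then 0
    else
      let kf := PySem.Int.mod ksq 8
      let kr := PySem.Int.floordiv ksq 8
      if side = 0 then
        if kr > 2 then 0 else pvB_shelter friendly_pawn_squares kf (kr + 1) (kr + 2)
      else
        if kr < 5 then 0 else pvB_shelter friendly_pawn_squares kf (kr - 1) (kr - 2)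

-- ===== PRECONDITION & SPEC =====
def Spec_chess_king_shelter_py (king_sq : Option Int) (friendly_pawn_squares : List Int) (side : Int) (out : Int) : Prop := out = chess_king_shelter_py_alt king_sq friendly_pawn_squares side
instance (king_sq : Option Int) (friendly_pawn_squares : List Int) (side : Int) (out : Int) : Decidable (Spec_chess_king_shelter_py king_sq friendly_pawn_squares side out) := by unfold Spec_chess_king_shelter_py; infer_instance

-- ===== CLAIM =====
def Claim_equal_chess_king_shelter_py : Prop := ∀ (king_sq : Option Int) (friendly_pawn_squares : List Int) (side : Int), Dom_chess_king_shelter_py king_sq friendly_pawn_squares side → Spec_chess_king_shelter_py king_sq friendly_pawn_squares side (chess_king_shelter_py king_sq friendly_pawn_squares side)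

-- ===== LEMMAS AND PROOFS =====

-- A's per-file scan computes 20/10/0 by existence of a pawn on (pf, want-rank)
lemma pvA_foldl (pf w1 w2 : Int) (l : List Int) (b : Int) (hb : 0 ≤ b) :
    l.foldl (pvA_step pf w1 w2) b
    = max b (if ∃ psq ∈ l, PySem.Int.mod psq 8 = pf ∧ PySem.Int.floordiv psq 8 = w1 then 20
       else if ∃ psq ∈ l, PySem.Int.mod psq 8 = pf ∧ PySem.Int.floordiv psq 8 = w2 then 10
       else 0) := by
  induction l generalizing b with
  | nil => simp [max_eq_left hb]
  | cons x xs ih =>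
    simp only [List.foldl_cons, List.exists_mem_cons_iff]
    by_cases h1 : PySem.Int.mod x 8 = pf
    · by_cases h2 : PySem.Int.floordiv x 8 = w1
      · have hstep : pvA_step pf w1 w2 b x = max b 20 := by
          unfold pvA_step; split_ifs <;> simp_all
        rw [hstep, ih _ (by omega : (0:Int) ≤ max b 20),
            if_pos (Or.inl ⟨h1, h2⟩ :
              (PySem.Int.mod x 8 = pf ∧ PySem.Int.floordiv x 8 = w1) ∨
              ∃ psq ∈ xs, PySem.Int.mod psq 8 = pf ∧ PySem.Int.floordiv psq 8 = w1)]
        split_ifs <;> omega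
      · by_cases h3 : PySem.Int.floordiv x 8 = w2
        · have hstep : pvA_step pf w1 w2 b x = max b 10 := by
            unfold pvA_step; split_ifs <;> simp_all
          rw [hstep, ih _ (by omega : (0:Int) ≤ max b 10)]
          simp only [or_iff_right (fun hx => h2 hx.2 :
              ¬(PySem.Int.mod x 8 = pf ∧ PySem.Int.floordiv x 8 = w1)),
            iff_true_intro (Or.inl ⟨h1, h3⟩ :
              (PySem.Int.mod x 8 = pf ∧ PySem.Int.floordiv x 8 = w2) ∨
              ∃ psq ∈ xs, PySem.Int.mod psq 8 = pf ∧ PySem.Int.floordiv psq 8 = w2), if_true]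
          split_ifs <;> omega
        · have hstep : pvA_step pf w1 w2 b x = b := by
            unfold pvA_step; split_ifs <;> simp_all
          rw [hstep, ih _ hb]
          simp only [or_iff_right (fun hx => h2 hx.2 :
              ¬(PySem.Int.mod x 8 = pf ∧ PySem.Int.floordiv x 8 = w1)),
            or_iff_right (fun hx => h3 hx.2 :
              ¬(PySem.Int.mod x 8 = pf ∧ PySem.Int.floordiv x 8 = w2))]
    · have hstep : pvA_step pf w1 w2 b x = b := by
        unfold pvA_step; split_ifs <;> simp_all
      rw [hstep, ih _ hb]
      simp only [or_iff_right (fun hx => h1 hx.1 :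
          ¬(PySem.Int.mod x 8 = pf ∧ PySem.Int.floordiv x 8 = w1)),
        or_iff_right (fun hx => h1 hx.1 :
          ¬(PySem.Int.mod x 8 = pf ∧ PySem.Int.floordiv x 8 = w2))]

-- membership in B's file set = existence of a pawn on (pf, w)
lemma pv_mem_files_at (l : List Int) (w pf : Int) :
    pf ∈ pvB_files_at l w ↔ ∃ psq ∈ l, PySem.Int.mod psq 8 = pf ∧ PySem.Int.floordiv psq 8 = w := by
  unfold pvB_files_at
  rw [PySem.Set.mem_ofList]
  simp only [List.mem_map, List.mem_filter, beq_iff_eq]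
  constructor
  · rintro ⟨p, ⟨hp, hw⟩, he⟩; exact ⟨p, hp, he, hw⟩
  · rintro ⟨p, hp, h1, h2⟩; exact ⟨p, ⟨hp, h2⟩, h1⟩

-- cardinality of an intersection of nodup lists is symmetric in the two sides
lemma pv_filter_mem_comm (s t : List Int) (hs : s.Nodup) (ht : t.Nodup) :
    (s.filter (fun a => decide (a ∈ t))).length = (t.filter (fun a => decide (a ∈ s))).length := by
  have h1 : ∀ (u v : List Int), u.Nodup →
      (u.filter (fun a => decide (a ∈ v))).length = (u.toFinset ∩ v.toFinset).card := by
    intro u v hu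
    rw [← List.toFinset_card_of_nodup (hu.filter _)]
    congr 1
    ext a
    simp
  rw [h1 s t hs, h1 t s ht, Finset.inter_comm]

lemma pv_key (L : List Int) (p q1 q2 : Int → Prop) [DecidablePred p] [DecidablePred q1]
    [DecidablePred q2] (init : Int) :
    L.foldl (fun s pf => if p pf then s + (if q1 pf then 20 else if q2 pf then 10 else 0) else s) init
    = init + 20 * ((L.filter (fun pf => decide (p pf) && decide (q1 pf))).length : Int)
      + 10 * ((L.filter (fun pf => decide (p pf) && decide (q2 pf) && !decide (q1 pf))).length : Int) := by
  induction L generalizing init with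
  | nil => simp
  | cons x xs ih =>
    simp only [List.foldl_cons, List.filter_cons, ih]
    by_cases hp : p x <;> by_cases h1 : q1 x <;> by_cases h2 : q2 x <;>
      simp [hp, h1, h2] <;> ring

lemma pv_shelter_eq (l : List Int) (kf w1 w2 : Int) :
    pvA_shelter l kf w1 w2 = pvB_shelter l kf w1 w2 := by
  -- A-side: rewrite to the counting form
  have hA : pvA_shelter l kf w1 w2
      = 20 * (([kf - 1, kf, kf + 1].filter (fun pf => decide (0 ≤ pf ∧ pf < 8)
              && decide (∃ psq ∈ l, PySem.Int.mod psq 8 = pf ∧ PySem.Int.floordiv psq 8 = w1))).length : Int)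
        + 10 * (([kf - 1, kf, kf + 1].filter (fun pf => decide (0 ≤ pf ∧ pf < 8)
              && decide (∃ psq ∈ l, PySem.Int.mod psq 8 = pf ∧ PySem.Int.floordiv psq 8 = w2)
              && !decide (∃ psq ∈ l, PySem.Int.mod psq 8 = pf ∧ PySem.Int.floordiv psq 8 = w1))).length : Int) := by
    unfold pvA_shelter pvA_file_bonus
    have hfun : (fun (s pf : Int) => if 0 ≤ pf ∧ pf < 8 then s + l.foldl (pvA_step pf w1 w2) 0 else s)
        = (fun s pf => if 0 ≤ pf ∧ pf < 8 then s
            + (if ∃ psq ∈ l, PySem.Int.mod psq 8 = pf ∧ PySem.Int.floordiv psq 8 = w1 then 20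
               else if ∃ psq ∈ l, PySem.Int.mod psq 8 = pf ∧ PySem.Int.floordiv psq 8 = w2 then 10
               else 0) else s) := by
      funext s pf
      rw [pvA_foldl pf w1 w2 l 0 le_rfl]
      congr 1
      split_ifs <;> simp
    rw [hfun, pv_key [kf - 1, kf, kf + 1]
      (fun pf => 0 ≤ pf ∧ pf < 8)
      (fun pf => ∃ psq ∈ l, PySem.Int.mod psq 8 = pf ∧ PySem.Int.floordiv psq 8 = w1)
      (fun pf => ∃ psq ∈ l, PySem.Int.mod psq 8 = pf ∧ PySem.Int.floordiv psq 8 = w2) 0]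
    ring
  -- B-side: reduce the set cardinalities to the same filters over the three files
  have hnear_nodup : ([kf - 1, kf, kf + 1].filter (fun f => decide (0 ≤ f ∧ f < 8))).Nodup := by
    apply List.Nodup.filter
    simp only [List.nodup_cons, List.mem_cons, List.not_mem_nil, List.nodup_nil,
      or_false, not_or, and_true, not_false_iff]
    omega
  have hnear : PySem.Set.ofList ([kf - 1, kf, kf + 1].filter (fun f => decide (0 ≤ f ∧ f < 8)))
      = [kf - 1, kf, kf + 1].filter (fun f => decide (0 ≤ f ∧ f < 8)) :=
    PySem.Set.ofList_eq_self_of_nodup _ hnear_nodup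
  have hf1n : (pvB_files_at l w1).Nodup := PySem.Set.nodup_ofList _
  have hdn : (PySem.Set.diff (pvB_files_at l w2) (pvB_files_at l w1)).Nodup :=
    PySem.Set.nodup_diff _ _ (PySem.Set.nodup_ofList _)
  have hinter : ∀ (s : List Int), s.Nodup →
      PySem.Set.len (PySem.Set.inter s ([kf - 1, kf, kf + 1].filter (fun f => decide (0 ≤ f ∧ f < 8))))
      = ((([kf - 1, kf, kf + 1].filter (fun f => decide (0 ≤ f ∧ f < 8))).filter
          (fun a => decide (a ∈ s))).length : Int) := by
    intro s hsnd
    have hi : PySem.Set.inter s ([kf - 1, kf, kf + 1].filter (fun f => decide (0 ≤ f ∧ f < 8)))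
        = s.filter (fun a => decide (a ∈ [kf - 1, kf, kf + 1].filter (fun f => decide (0 ≤ f ∧ f < 8)))) := by
      simp [PySem.Set.inter]
    rw [PySem.Set.len, hi]
    exact congrArg (fun n : Nat => (n : Int)) (pv_filter_mem_comm s _ hsnd hnear_nodup)
  show pvA_shelter l kf w1 w2
      = 20 * PySem.Set.len (PySem.Set.inter (pvB_files_at l w1)
          (PySem.Set.ofList ([kf - 1, kf, kf + 1].filter (fun f => decide (0 ≤ f ∧ f < 8)))))
        + 10 * PySem.Set.len (PySem.Set.inter (PySem.Set.diff (pvB_files_at l w2) (pvB_files_at l w1))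
          (PySem.Set.ofList ([kf - 1, kf, kf + 1].filter (fun f => decide (0 ≤ f ∧ f < 8)))))
  rw [hnear, hinter _ hf1n, hinter _ hdn, hA]
  have e1 : ([kf - 1, kf, kf + 1].filter (fun f => decide (0 ≤ f ∧ f < 8))).filter
        (fun a => decide (a ∈ pvB_files_at l w1))
      = [kf - 1, kf, kf + 1].filter (fun pf => decide (0 ≤ pf ∧ pf < 8)
          && decide (∃ psq ∈ l, PySem.Int.mod psq 8 = pf ∧ PySem.Int.floordiv psq 8 = w1)) := by
    rw [List.filter_filter]
    apply List.filter_congr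
    intro a _
    rw [decide_eq_decide.mpr (pv_mem_files_at l w1 a)]
    exact Bool.and_comm _ _
  have e2 : ([kf - 1, kf, kf + 1].filter (fun f => decide (0 ≤ f ∧ f < 8))).filter
        (fun a => decide (a ∈ PySem.Set.diff (pvB_files_at l w2) (pvB_files_at l w1)))
      = [kf - 1, kf, kf + 1].filter (fun pf => decide (0 ≤ pf ∧ pf < 8)
          && decide (∃ psq ∈ l, PySem.Int.mod psq 8 = pf ∧ PySem.Int.floordiv psq 8 = w2)
          && !decide (∃ psq ∈ l, PySem.Int.mod psq 8 = pf ∧ PySem.Int.floordiv psq 8 = w1)) := by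
    rw [List.filter_filter]
    apply List.filter_congr
    intro a _
    have hd : (a ∈ PySem.Set.diff (pvB_files_at l w2) (pvB_files_at l w1))
        ↔ ((∃ psq ∈ l, PySem.Int.mod psq 8 = a ∧ PySem.Int.floordiv psq 8 = w2)
            ∧ ¬ (∃ psq ∈ l, PySem.Int.mod psq 8 = a ∧ PySem.Int.floordiv psq 8 = w1)) := by
      rw [PySem.Set.mem_diff, pv_mem_files_at, pv_mem_files_at]
    rw [decide_eq_decide.mpr hd, show ∀ (p q : Prop) (_ : Decidable p) (_ : Decidable q), decide (p ∧ ¬ q) = (decide p && !decide q) from by intros p q _ _; simp]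
    ac_rfl
  rw [e1, e2]

-- ===== VERDICT =====
theorem chess_king_shelter_py_spec : Claim_equal_chess_king_shelter_py := by
  intro king_sq l side _
  unfold Spec_chess_king_shelter_py chess_king_shelter_py chess_king_shelter_py_alt
  cases king_sq with
  | none => rfl
  | some ksq =>
    simp only
    split_ifs <;> first
      | rfl
      | exact pv_shelter_eq l _ _ _
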